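-- pv_equiv track=rewrite | github.com/aqiu384/megaten-database | src/sh2/tool-parse.py | drop_unused_names
-- ===== SOURCE A (Python) =====
-- def drop_unused_names(all_names, used_names, remapped_ids):
--     seen = {}
--     lookup = {}
--     for id, name in all_names.items():
--         if id not in used_names:
--             continue
--
--         if name not in seen:
--             seen[name] = 0
--         new_name = f"{name} {chr(65 + seen[name])}" if seen[name] > 0 else name
--         seen[name] += 1
--
--         lookup[id] = remapped_ids.get(new_name, new_name)
--     return lookup
-- ===== SOURCE B (Python) =====
-- def drop_unused_names(all_names, used_names, remapped_ids):
--     # Filter first, then name each position statelessly from its prefix: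
--     # the k-th occurrence of a name (k counted in the filtered prefix) gets
--     # the bare name for k == 0 and f"{name} {chr(65 + k)}" otherwise.
--     pairs = [(i, n) for i, n in all_names.items() if i in used_names]
--     lookup = {}
--     for idx, (i, n) in enumerate(pairs):
--         k = sum(1 for _, m in pairs[:idx] if m == n)
--         nn = n if k == 0 else f"{n} {chr(65 + k)}"
--         lookup[i] = remapped_ids.get(nn, nn)
--     return lookup
-- ===== Notes on version B (the rewrite author's own statement) =====
-- stated objective: alternative
-- what changed: B filters the used entries into a list first and then names each position statelessly from its prefix occurrence count (sum over pairs[:idx]), instead of A's single pass threading a mutable `seen` counter dict with conditional initialisation.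
import Mathlib
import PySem

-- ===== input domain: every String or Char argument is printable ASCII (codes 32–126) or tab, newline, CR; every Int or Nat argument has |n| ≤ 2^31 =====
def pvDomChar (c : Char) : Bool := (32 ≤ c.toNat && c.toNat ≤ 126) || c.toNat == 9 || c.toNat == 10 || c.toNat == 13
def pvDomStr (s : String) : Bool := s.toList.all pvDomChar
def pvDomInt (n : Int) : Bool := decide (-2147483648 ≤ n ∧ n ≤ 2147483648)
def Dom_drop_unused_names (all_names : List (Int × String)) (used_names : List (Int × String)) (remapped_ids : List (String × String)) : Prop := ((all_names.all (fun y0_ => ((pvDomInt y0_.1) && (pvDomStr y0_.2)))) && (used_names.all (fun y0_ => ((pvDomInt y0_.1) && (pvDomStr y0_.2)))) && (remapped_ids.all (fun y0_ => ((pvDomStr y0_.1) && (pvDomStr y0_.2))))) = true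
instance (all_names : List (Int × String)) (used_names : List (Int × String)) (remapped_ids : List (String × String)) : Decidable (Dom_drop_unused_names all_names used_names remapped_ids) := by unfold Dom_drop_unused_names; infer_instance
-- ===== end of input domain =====

-- B replaces A's running `seen` counter dict by a filter-first pass that names each
-- kept entry statelessly from its prefix occurrence count (objective: alternative).

-- ===== PORT A =====
-- chr(n) as a one-character string (exact for the code points these inputs reach)
def pvChrStr (n : Nat) : String := String.ofList [Char.ofNat n]

-- one iteration of A's loop body, state = (seen, lookup)
def pvStepA (used : PySem.Dict Int String) (rmap : PySem.Dict String String)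
    (st : PySem.Dict String Int × PySem.Dict Int String) (p : Int × String) :
    PySem.Dict String Int × PySem.Dict Int String :=
  if used.contains p.1 = false then st
  else
    let seen1 := if st.1.contains p.2 = false then st.1.insert p.2 0 else st.1
    let cnt := seen1.getD p.2 0
    let new_name := if cnt > 0 then p.2 ++ " " ++ pvChrStr (65 + cnt).toNat else p.2
    (seen1.insert p.2 (cnt + 1), st.2.insert p.1 (rmap.getD new_name new_name))

def drop_unused_names (all_names : List (Int × String)) (used_names : List (Int × String)) (remapped_ids : List (String × String)) : List (Int × String) :=
  (((PySem.Dict.ofList all_names).items.foldl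
      (pvStepA (PySem.Dict.ofList used_names) (PySem.Dict.ofList remapped_ids))
      (PySem.Dict.empty, PySem.Dict.empty)).2).items

-- ===== PORT B =====
-- B's loop body: name position q.1 from its prefix occurrence count in `pairs`
def pvStepB (rmap : PySem.Dict String String) (pairs : List (Int × String))
    (lookup : PySem.Dict Int String) (q : Int × (Int × String)) : PySem.Dict Int String :=
  let k := ((PySem.List.slice pairs none (some q.1)).filter (fun p => p.2 == q.2.2)).length
  let nn := if k == 0 then q.2.2 else q.2.2 ++ " " ++ pvChrStr (65 + k)
  lookup.insert q.2.1 (rmap.getD nn nn)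

def drop_unused_names_alt (all_names : List (Int × String)) (used_names : List (Int × String)) (remapped_ids : List (String × String)) : List (Int × String) :=
  let pairs := (PySem.Dict.ofList all_names).items.filter
      (fun p => (PySem.Dict.ofList used_names).contains p.1)
  ((PySem.List.enumerate pairs 0).foldl
      (pvStepB (PySem.Dict.ofList remapped_ids) pairs) PySem.Dict.empty).items

-- ===== PRECONDITION & SPEC =====
def Spec_drop_unused_names (all_names : List (Int × String)) (used_names : List (Int × String)) (remapped_ids : List (String × String)) (out : List (Int × String)) : Prop := out = drop_unused_names_alt all_names used_names remapped_ids
instance (all_names : List (Int × String)) (used_names : List (Int × String)) (remapped_ids : List (String × String)) (out : List (Int × String)) : Decidable (Spec_drop_unused_names all_names used_names remapped_ids out) := by unfold Spec_drop_unused_names; infer_instance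

-- ===== CLAIM (what is proved, stated in full; the proofs are below) =====
def Claim_equal_drop_unused_names : Prop := ∀ (all_names : List (Int × String)) (used_names : List (Int × String)) (remapped_ids : List (String × String)), Dom_drop_unused_names all_names used_names remapped_ids → Spec_drop_unused_names all_names used_names remapped_ids (drop_unused_names all_names used_names remapped_ids)

-- ===== LEMMAS AND PROOFS =====

-- A's loop body with the `continue` guard stripped (proof-only)
def pvCoreA (rmap : PySem.Dict String String)
    (st : PySem.Dict String Int × PySem.Dict Int String) (p : Int × String) :
    PySem.Dict String Int × PySem.Dict Int String :=
  let seen1 := if st.1.contains p.2 = false then st.1.insert p.2 0 else st.1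
  let cnt := seen1.getD p.2 0
  let new_name := if cnt > 0 then p.2 ++ " " ++ pvChrStr (65 + cnt).toNat else p.2
  (seen1.insert p.2 (cnt + 1), st.2.insert p.1 (rmap.getD new_name new_name))

-- A's guarded fold over all items = unguarded fold over the kept (filtered) items
lemma pv_fold_filter (used : PySem.Dict Int String) (rmap : PySem.Dict String String)
    (l : List (Int × String)) (init : PySem.Dict String Int × PySem.Dict Int String) :
    l.foldl (pvStepA used rmap) init
      = (l.filter (fun p => used.contains p.1)).foldl (pvCoreA rmap) init := by
  rw [List.foldl_filter]
  congr 1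
  funext st p
  by_cases h : used.contains p.1 <;> simp [pvStepA, pvCoreA, h]

-- main invariant: seen.getD n 0 = number of occurrences of name n in the processed prefix
lemma pv_main (rmap : PySem.Dict String String) :
    ∀ (rest pre : List (Int × String)) (seen : PySem.Dict String Int)
      (lookup : PySem.Dict Int String),
    (∀ n, seen.getD n 0 = ((pre.filter (fun p => p.2 == n)).length : Int)) →
    (rest.foldl (pvCoreA rmap) (seen, lookup)).2
      = (PySem.List.enumerate rest (pre.length : Int)).foldl
          (pvStepB rmap (pre ++ rest)) lookup := by
  intro rest
  induction rest with
  | nil => intro pre seen lookup _; simp [PySem.List.enumerate]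
  | cons p rest ih =>
    intro pre seen lookup hinv
    rw [PySem.List.enumerate_cons]
    -- the count cnt used by A equals B's prefix count k
    have hslice : PySem.List.slice (pre ++ p :: rest) none (some (pre.length : Int)) = pre := by
      rw [PySem.List.slice_to_natCast, List.take_left]
    have hcnt : (if seen.contains p.2 = false then seen.insert p.2 0 else seen).getD p.2 0
        = ((pre.filter (fun q => q.2 == p.2)).length : Int) := by
      by_cases h : seen.contains p.2
      · simp [h, hinv p.2]
      · rw [if_pos (by simp [h]), PySem.Dict.getD_insert,
            ← hinv p.2, PySem.Dict.getD_of_not_contains seen 0 (by simp [h])]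
        simp
    have hinv1 : ∀ n, (if seen.contains p.2 = false then seen.insert p.2 0 else seen).getD n 0
        = ((pre.filter (fun q => q.2 == n)).length : Int) := by
      intro n
      by_cases h : seen.contains p.2
      · simp [h, hinv n]
      · rw [if_pos (by simp [h]), PySem.Dict.getD_insert]
        by_cases hn : n = p.2
        · subst hn
          rw [← hinv p.2, PySem.Dict.getD_of_not_contains seen 0 (by simp [h])]
          simp
        · rw [if_neg hn, hinv n]
    simp only [List.foldl_cons]
    -- the two inserted (id, value) updates coincide
    have hval : (pvCoreA rmap (seen, lookup) p).2
        = pvStepB rmap (pre ++ p :: rest) lookup ((pre.length : Int), p) := by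
      simp only [pvCoreA, pvStepB, hslice, hcnt]
      congr 2 <;>
      · by_cases hk0 : (pre.filter (fun q => q.2 == p.2)).length = 0
        · simp [hk0]
        · have hpos : (0 : Int) < ((pre.filter (fun q => q.2 == p.2)).length : Int) := by omega
          rw [if_pos hpos, if_neg (by simpa using hk0),
              show ((65 : Int) + ((pre.filter (fun q => q.2 == p.2)).length : Int)).toNat
                  = 65 + (pre.filter (fun q => q.2 == p.2)).length from by omega]
    have hseen : (pvCoreA rmap (seen, lookup) p).1
        = (if seen.contains p.2 = false then seen.insert p.2 0 else seen).insert p.2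
            (((pre.filter (fun q => q.2 == p.2)).length : Int) + 1) := by
      simp only [pvCoreA, hcnt]
    have hinv2 : ∀ n, ((pvCoreA rmap (seen, lookup) p).1).getD n 0
        = (((pre ++ [p]).filter (fun q => q.2 == n)).length : Int) := by
      intro n
      rw [hseen, PySem.Dict.getD_insert]
      by_cases hn : n = p.2
      · subst hn
        rw [if_pos rfl, List.filter_append]
        simp
      · rw [if_neg hn, hinv1 n, List.filter_append]
        have hne : (p.2 == n) = false := by
          rw [beq_eq_false_iff_ne]; exact fun h => hn h.symm
        simp only [List.filter_cons, List.filter_nil, hne, Bool.false_eq_true,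
          if_false, List.append_nil]
    have := ih (pre ++ [p]) (pvCoreA rmap (seen, lookup) p).1
        (pvCoreA rmap (seen, lookup) p).2 hinv2
    rw [show pvCoreA rmap (seen, lookup) p
        = ((pvCoreA rmap (seen, lookup) p).1, (pvCoreA rmap (seen, lookup) p).2) from rfl] at this ⊢
    rw [this, hval]
    have hlen : ((pre ++ [p]).length : Int) = (pre.length : Int) + 1 := by
      simp
    rw [hlen]
    simp only [List.append_assoc, List.cons_append, List.nil_append]

-- ===== VERDICT (by name: the statement is the Claim_ definition above) =====
theorem drop_unused_names_spec : Claim_equal_drop_unused_names := by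
  intro all_names used_names remapped_ids _
  unfold Spec_drop_unused_names drop_unused_names drop_unused_names_alt
  rw [pv_fold_filter]
  exact congrArg PySem.Dict.items (by
    simpa using pv_main (PySem.Dict.ofList remapped_ids)
      ((PySem.Dict.ofList all_names).items.filter
        (fun p => (PySem.Dict.ofList used_names).contains p.1))
      [] PySem.Dict.empty PySem.Dict.empty
      (by intro n; simp [PySem.Dict.getD_empty]))
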